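-- pv_equiv track=rewrite | github.com/Acciolyy/md2 | md2/8.py | criar_tabela_zn
-- ===== SOURCE A (Python) =====
-- def criar_tabela_zn(x):
--     t = []
--     for i in range(x):
--         l = []
--         for j in range(x):
--             valor = (i * j) % x
--             l.append(valor)
--         t.append(l)
--     return t
-- ===== SOURCE B (Python) =====
-- def criar_tabela_zn(x):
--     t = [[0] * x for _ in range(x)]
--     for i in range(x):
--         for j in range(i, x):
--             v = (i * j) % x
--             t[i][j] = v
--             t[j][i] = v
--     return t
-- ===== Notes on version B (the rewrite author's own statement) =====
-- stated objective: alternative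
-- what changed: B preallocates an x-by-x zero matrix and fills only the upper triangle (j from i to x-1), mirroring each value v=(i*j)%x into both t[i][j] and t[j][i], instead of A's append-based recomputation of every cell; it trades append-built rows for in-place symmetric assignment with half the modulo operations.
import Mathlib
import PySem

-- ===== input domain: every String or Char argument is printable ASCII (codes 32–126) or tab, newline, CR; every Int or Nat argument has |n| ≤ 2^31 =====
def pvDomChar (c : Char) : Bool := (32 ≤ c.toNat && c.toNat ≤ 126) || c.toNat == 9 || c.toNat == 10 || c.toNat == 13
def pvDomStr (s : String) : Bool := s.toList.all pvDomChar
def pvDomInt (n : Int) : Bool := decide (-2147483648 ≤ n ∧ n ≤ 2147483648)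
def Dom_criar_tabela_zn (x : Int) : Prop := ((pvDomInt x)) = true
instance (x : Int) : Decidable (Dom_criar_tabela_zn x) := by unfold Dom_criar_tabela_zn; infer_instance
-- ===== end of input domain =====

-- B preallocates the x×x matrix and fills only the upper triangle, mirroring each value into the symmetric cell (objective: alternative algorithm, same asymptotic cost).

-- ===== PORT A =====
def criar_tabela_zn (x : Int) : List (List Int) :=
  (PySem.List.pyRange 0 x 1).foldl
    (fun t i =>
      t ++ [(PySem.List.pyRange 0 x 1).foldl
              (fun l j => l ++ [PySem.Int.mod (i * j) x]) []])
    []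

-- ===== PORT B =====
-- t[a][b] = v  (in-place assignment into a matrix row)
def pvSet2 (t : List (List Int)) (a b : Int) (v : Int) : List (List Int) :=
  PySem.List.pySetD t a (PySem.List.pySetD (PySem.List.pyGetD t a []) b v)

-- body of B's inner loop: v = (i*j) % x; t[i][j] = v; t[j][i] = v
def pvInnerStep (x i : Int) (t : List (List Int)) (j : Int) : List (List Int) :=
  let v := PySem.Int.mod (i * j) x
  let t := pvSet2 t i j v
  pvSet2 t j i v

def criar_tabela_zn_alt (x : Int) : List (List Int) :=
  let t0 := (PySem.List.pyRange 0 x 1).map (fun _ => PySem.List.pyRepeat [(0 : Int)] x)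
  (PySem.List.pyRange 0 x 1).foldl
    (fun t i => (PySem.List.pyRange i x 1).foldl (pvInnerStep x i) t)
    t0

-- ===== PRECONDITION & SPEC =====
def Spec_criar_tabela_zn (x : Int) (out : List (List Int)) : Prop := out = criar_tabela_zn_alt x
instance (x : Int) (out : List (List Int)) : Decidable (Spec_criar_tabela_zn x out) := by unfold Spec_criar_tabela_zn; infer_instance

-- ===== CLAIM (what is proved, stated in full; the proofs are below) =====
def Claim_equal_criar_tabela_zn : Prop := ∀ (x : Int), Dom_criar_tabela_zn x → Spec_criar_tabela_zn x (criar_tabela_zn x)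

-- ===== LEMMAS AND PROOFS =====

-- the canonical table both programs compute
def pvRow (x i : Int) : List Int :=
  (PySem.List.pyRange 0 x 1).map (fun j => PySem.Int.mod (i * j) x)
def pvTab (x : Int) : List (List Int) := (PySem.List.pyRange 0 x 1).map (pvRow x)

-- cell read and shape invariant used to reason about B
def pvG (t : List (List Int)) (a b : Int) : Int :=
  PySem.List.pyGetD (PySem.List.pyGetD t a []) b 0
def pvSh (x : Int) (t : List (List Int)) : Prop :=
  t.length = x.toNat ∧ ∀ r ∈ t, r.length = x.toNat

theorem pv_foldl_app {α β : Type} (f : α → β) :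
    ∀ (l : List α) (init : List β),
      l.foldl (fun acc a => acc ++ [f a]) init = init ++ l.map f := by
  intro l
  induction l with
  | nil => simp
  | cons a l ih => intro init; simp [List.foldl_cons, ih]

theorem pvA_eq_tab (x : Int) : criar_tabela_zn x = pvTab x := by
  unfold criar_tabela_zn pvTab pvRow
  rw [pv_foldl_app]
  simp only [List.nil_append]
  congr 1
  funext i
  rw [pv_foldl_app]
  simp

theorem pvSet2_sh {x : Int} {t : List (List Int)} (h : pvSh x t)
    {a : Int} (ha : 0 ≤ a ∧ a < x) (b v : Int) : pvSh x (pvSet2 t a b v) := by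
  obtain ⟨hl, hr⟩ := h
  have haN : a.toNat < t.length := by omega
  unfold pvSet2
  rw [PySem.List.pySetD_of_nonneg _ _ ha.1]
  refine ⟨by simpa using hl, ?_⟩
  intro r hrm
  rcases List.mem_or_eq_of_mem_set hrm with hmem | heq
  · exact hr r hmem
  · subst heq
    rw [PySem.List.length_pySetD]
    rw [PySem.List.pyGetD_of_nonneg _ _ ha.1, List.getD_eq_getElem _ _ haN]
    exact hr _ (List.getElem_mem haN)

theorem pvG_getD (t : List (List Int)) {p q : Int} (hp : 0 ≤ p) (hq : 0 ≤ q) :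
    pvG t p q = (t.getD p.toNat []).getD q.toNat 0 := by
  unfold pvG
  rw [PySem.List.pyGetD_of_nonneg _ _ hp, PySem.List.pyGetD_of_nonneg _ _ hq]

theorem pvG_set2 {x : Int} {t : List (List Int)} (h : pvSh x t)
    {a b p q : Int} (ha : 0 ≤ a ∧ a < x) (hb : 0 ≤ b ∧ b < x)
    (hp : 0 ≤ p ∧ p < x) (hq : 0 ≤ q ∧ q < x) (v : Int) :
    pvG (pvSet2 t a b v) p q = if p = a ∧ q = b then v else pvG t p q := by
  obtain ⟨hl, hr⟩ := h
  have haN : a.toNat < t.length := by omega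
  have hpN : p.toNat < t.length := by omega
  have hrowlen : (t.getD a.toNat []).length = x.toNat := by
    rw [List.getD_eq_getElem _ _ haN]; exact hr _ (List.getElem_mem haN)
  unfold pvSet2
  rw [PySem.List.pySetD_of_nonneg _ _ ha.1, PySem.List.pyGetD_of_nonneg _ _ ha.1,
      PySem.List.pySetD_of_nonneg _ _ hb.1,
      pvG_getD _ hp.1 hq.1, pvG_getD t hp.1 hq.1]
  set r' := (t.getD a.toNat []).set b.toNat v with hr'
  have houter : (t.set a.toNat r').getD p.toNat [] =
      if a.toNat = p.toNat then r' else t.getD p.toNat [] := by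
    rw [List.getD_eq_getElem (t.set a.toNat r') [] (by simpa using hpN), List.getElem_set]
    split_ifs
    · rfl
    · rw [List.getD_eq_getElem t [] hpN]
  rw [houter]
  by_cases hpa : a.toNat = p.toNat
  · rw [if_pos hpa]
    have hpa' : p = a := by omega
    have hinner : r'.getD q.toNat 0 =
        if b.toNat = q.toNat then v else (t.getD a.toNat []).getD q.toNat 0 := by
      rw [hr', List.getD_eq_getElem ((t.getD a.toNat []).set b.toNat v) 0
            (by rw [List.length_set]; omega),
          List.getElem_set]
      split_ifs
      · rfl
      · rw [List.getD_eq_getElem (t.getD a.toNat []) 0 (by omega)]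
    rw [hinner]
    by_cases hbq : b.toNat = q.toNat
    · rw [if_pos hbq, if_pos ⟨hpa', by omega⟩]
    · rw [if_neg hbq, if_neg (by omega), hpa']
  · rw [if_neg hpa, if_neg (by omega)]

theorem pv_inner (x i : Int) (hi : 0 ≤ i) :
    ∀ (fuel : Nat) (m : Int), i ≤ m → (x - m).toNat ≤ fuel →
    ∀ t, pvSh x t →
      pvSh x ((PySem.List.pyRange m x 1).foldl (pvInnerStep x i) t) ∧
      ∀ p q, 0 ≤ p → p < x → 0 ≤ q → q < x →
        pvG ((PySem.List.pyRange m x 1).foldl (pvInnerStep x i) t) p q =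
          if (p = i ∧ m ≤ q) ∨ (q = i ∧ m ≤ p) then PySem.Int.mod (p * q) x
          else pvG t p q := by
  intro fuel
  induction fuel with
  | zero =>
    intro m him hfuel t ht
    rw [PySem.List.pyRange_one_eq_nil (by omega)]
    exact ⟨ht, fun p q hp hpx hq hqx => by rw [List.foldl_nil, if_neg (by omega)]⟩
  | succ n ih =>
    intro m him hfuel t ht
    by_cases hmx : m < x
    · rw [PySem.List.pyRange_one_cons hmx, List.foldl_cons]
      have hix : 0 ≤ i ∧ i < x := ⟨hi, by omega⟩
      have hmx' : 0 ≤ m ∧ m < x := ⟨by omega, hmx⟩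
      have ht1 : pvSh x (pvInnerStep x i t m) := by
        simp only [pvInnerStep]
        exact pvSet2_sh (pvSet2_sh ht hix _ _) hmx' _ _
      obtain ⟨S, H⟩ := ih (m + 1) (by omega) (by omega) _ ht1
      refine ⟨S, ?_⟩
      intro p q hp hpx hq hqx
      rw [H p q hp hpx hq hqx]
      have e1 : pvG (pvInnerStep x i t m) p q =
          if p = m ∧ q = i then PySem.Int.mod (i * m) x
          else if p = i ∧ q = m then PySem.Int.mod (i * m) x
          else pvG t p q := by
        simp only [pvInnerStep]
        rw [pvG_set2 (pvSet2_sh ht hix _ _) hmx' hix ⟨hp, hpx⟩ ⟨hq, hqx⟩,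
            pvG_set2 ht hix hmx' ⟨hp, hpx⟩ ⟨hq, hqx⟩]
      rw [e1]
      split_ifs <;>
        first
          | omega
          | rfl
          | (have hpq : (p = m ∧ q = i) ∨ (p = i ∧ q = m) := by omega
             rcases hpq with ⟨rfl, rfl⟩ | ⟨rfl, rfl⟩ <;>
               first | rfl | rw [Int.mul_comm])
    · rw [PySem.List.pyRange_one_eq_nil (by omega)]
      exact ⟨ht, fun p q hp hpx hq hqx => by rw [List.foldl_nil, if_neg (by omega)]⟩

theorem pv_outer (x : Int) :
    ∀ (fuel : Nat) (kk : Int), 0 ≤ kk → (x - kk).toNat ≤ fuel →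
    ∀ t, pvSh x t →
      pvSh x ((PySem.List.pyRange kk x 1).foldl
        (fun t i => (PySem.List.pyRange i x 1).foldl (pvInnerStep x i) t) t) ∧
      ∀ p q, 0 ≤ p → p < x → 0 ≤ q → q < x →
        pvG ((PySem.List.pyRange kk x 1).foldl
          (fun t i => (PySem.List.pyRange i x 1).foldl (pvInnerStep x i) t) t) p q =
          if kk ≤ p ∧ kk ≤ q then PySem.Int.mod (p * q) x else pvG t p q := by
  intro fuel
  induction fuel with
  | zero =>
    intro kk hk hfuel t ht
    rw [PySem.List.pyRange_one_eq_nil (by omega)]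
    exact ⟨ht, fun p q hp hpx hq hqx => by rw [List.foldl_nil, if_neg (by omega)]⟩
  | succ n ih =>
    intro kk hk hfuel t ht
    by_cases hkx : kk < x
    · rw [PySem.List.pyRange_one_cons hkx, List.foldl_cons]
      obtain ⟨S1, H1⟩ := pv_inner x kk hk ((x - kk).toNat) kk le_rfl le_rfl t ht
      obtain ⟨S, H⟩ := ih (kk + 1) (by omega) (by omega) _ S1
      refine ⟨S, ?_⟩
      intro p q hp hpx hq hqx
      rw [H p q hp hpx hq hqx, H1 p q hp hpx hq hqx]
      split_ifs <;> first | rfl | omega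
    · rw [PySem.List.pyRange_one_eq_nil (by omega)]
      exact ⟨ht, fun p q hp hpx hq hqx => by rw [List.foldl_nil, if_neg (by omega)]⟩

theorem pvB_eq_tab (x : Int) : criar_tabela_zn_alt x = pvTab x := by
  by_cases hx : x ≤ 0
  · simp [criar_tabela_zn_alt, pvTab, PySem.List.pyRange_one_eq_nil hx]
  · have hx' : 0 < x := by omega
    have ht0 : pvSh x ((PySem.List.pyRange 0 x 1).map
        (fun _ => PySem.List.pyRepeat [(0 : Int)] x)) := by
      constructor
      · simp [PySem.List.length_pyRange_one]
      · intro r hr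
        simp only [List.mem_map] at hr
        obtain ⟨_, _, rfl⟩ := hr
        simp [PySem.List.pyRepeat_singleton]
    obtain ⟨S, H⟩ := pv_outer x ((x - 0).toNat) 0 le_rfl le_rfl _ ht0
    simp only [criar_tabela_zn_alt]
    apply List.ext_getElem
    · rw [S.1]; simp [pvTab, PySem.List.length_pyRange_one]
    · intro n h1 h2
      have hnx : (n : Int) < x := by rw [S.1] at h1; omega
      have hrowmem := S.2 _ (List.getElem_mem h1)
      have h2' : n < (PySem.List.pyRange 0 x 1).length := by
        simp [PySem.List.length_pyRange_one]; omega
      have hTab : (pvTab x)[n] = pvRow x n := by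
        simp only [pvTab]
        rw [List.getElem_map, PySem.List.getElem_pyRange_one _ _ _ h2']
        norm_num
      rw [hTab]
      apply List.ext_getElem
      · rw [hrowmem]; simp [pvRow, PySem.List.length_pyRange_one]
      · intro m hm1 hm2
        have hmx : (m : Int) < x := by rw [hrowmem] at hm1; omega
        have hm2' : m < (PySem.List.pyRange 0 x 1).length := by
          simp [PySem.List.length_pyRange_one]; omega
        have hRowEntry : (pvRow x n)[m] = PySem.Int.mod ((n : Int) * (m : Int)) x := by
          simp only [pvRow]
          rw [List.getElem_map, PySem.List.getElem_pyRange_one _ _ _ hm2']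
          norm_num
        rw [hRowEntry]
        have := H (n : Int) (m : Int) (by positivity) hnx (by positivity) hmx
        rw [if_pos ⟨Int.natCast_nonneg n, Int.natCast_nonneg m⟩] at this
        rw [← this, pvG_getD _ (Int.natCast_nonneg n) (Int.natCast_nonneg m)]
        simp only [Int.toNat_natCast]
        rw [List.getD_eq_getElem _ _ h1, List.getD_eq_getElem _ _ hm1]

-- ===== VERDICT (by name: the statement is the Claim_ definition above) =====
theorem criar_tabela_zn_spec : Claim_equal_criar_tabela_zn := by
  intro x _
  unfold Spec_criar_tabela_zn
  rw [pvA_eq_tab, pvB_eq_tab]
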